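-- pv_equiv track=rewrite | github.com/chriswengqi/kattis | ordinals/ordinals.py | f
-- ===== SOURCE A (Python) =====
-- def f(x):
--     if x == 0:
--         return str({})
--     else:
--         arr = []
--         for i in range(x):
--             arr.append(f(i))
--         ans = ",".join(arr)
--         return "{" + ans + "}"
-- ===== SOURCE B (Python) =====
-- def f(x):
--     if x <= 0:
--         return "{}"
--     memo = []
--     for i in range(x):
--         memo.append("{" + ",".join(memo) + "}")
--     return "{" + ",".join(memo) + "}"
-- ===== Notes on version B (the rewrite author's own statement) =====
-- stated objective: faster
-- what changed: Replaces the naive recursion that recomputes f(i) from scratch for every i with a single loop that caches all previous ordinal strings in a memo list and joins them once per step.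
import Mathlib
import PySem

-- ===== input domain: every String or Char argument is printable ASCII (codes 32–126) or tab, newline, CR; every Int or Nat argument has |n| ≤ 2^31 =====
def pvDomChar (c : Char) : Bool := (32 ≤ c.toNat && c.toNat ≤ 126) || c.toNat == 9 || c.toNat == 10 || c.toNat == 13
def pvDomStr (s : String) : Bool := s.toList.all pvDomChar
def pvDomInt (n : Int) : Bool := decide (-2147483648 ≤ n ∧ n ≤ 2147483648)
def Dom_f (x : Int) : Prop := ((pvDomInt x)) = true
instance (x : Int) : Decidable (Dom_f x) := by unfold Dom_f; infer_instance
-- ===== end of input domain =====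

-- B memoizes the previously built ordinal strings in a list instead of recomputing
-- every f(i) recursively from scratch (objective: faster).

-- ===== PORT A =====
-- A's recursion on an Int argument is realised on Nat: for x ≤ 0, range(x) is empty and
-- A's else-branch returns "{}", exactly what fAAux x.toNat = fAAux 0 computes.
def fAAux : Nat → String
  | n =>
    if n = 0 then "{}"
    else
      let arr := (List.range n).attach.map (fun i => fAAux i.1)
      "{" ++ PySem.Str.join "," arr ++ "}"
  decreasing_by exact List.mem_range.mp i.2

def f (x : Int) : String := fAAux x.toNat

-- ===== PORT B =====
def f_alt (x : Int) : String :=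
  if x ≤ 0 then "{}"
  else
    let memo := (List.range x.toNat).foldl
      (fun memo _ => memo ++ ["{" ++ PySem.Str.join "," memo ++ "}"]) []
    "{" ++ PySem.Str.join "," memo ++ "}"

-- ===== PRECONDITION & SPEC =====
def Spec_f (x : Int) (out : String) : Prop := out = f_alt x
instance (x : Int) (out : String) : Decidable (Spec_f x out) := by unfold Spec_f; infer_instance

-- ===== CLAIM (what is proved, stated in full; the proofs are below) =====
def Claim_equal_f : Prop := ∀ (x : Int), Dom_f x → Spec_f x (f x)

-- ===== LEMMAS AND PROOFS =====

-- A's value always has the bracketed-join shape, also at 0 (join of [] is empty).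
theorem fAAux_eq_join (n : Nat) :
    fAAux n = "{" ++ PySem.Str.join "," ((List.range n).map fAAux) ++ "}" := by
  rw [fAAux]
  rcases Nat.eq_zero_or_pos n with h | h
  · subst h; decide
  · simp [Nat.pos_iff_ne_zero.mp h]

-- B's memo loop builds exactly the list of A's values f(0), …, f(n-1).
theorem memo_eq_map (n : Nat) :
    (List.range n).foldl
      (fun memo _ => memo ++ ["{" ++ PySem.Str.join "," memo ++ "}"]) []
      = (List.range n).map fAAux := by
  induction n with
  | zero => rfl
  | succ m ih => rw [List.range_succ, List.foldl_append, List.map_append, ih, List.foldl_cons,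
      List.foldl_nil, ← fAAux_eq_join]; rfl

-- ===== VERDICT (by name: the statement is the Claim_ definition above) =====
theorem f_spec : Claim_equal_f := by
  intro x _
  show f x = f_alt x
  unfold f f_alt
  split
  · next h =>
    have : x.toNat = 0 := Int.toNat_of_nonpos h
    rw [this, fAAux]; rfl
  · next h =>
    rw [memo_eq_map, ← fAAux_eq_join]
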